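-- pv_equiv track=rewrite | github.com/AnuragSharma1803/address-standardization-tool | cleaning.py | clean_ctr_related_parts
-- ===== SOURCE A (Python) =====
-- def clean_ctr_related_parts(address):
--     if len(address) <= 3: return address
--     address_copy = address[:]
--     ctr_indices = [i for i, part in enumerate(address_copy) if 'ctr' in part.lower()]
--     if len(ctr_indices) > 1:
--         first_ctr_index = ctr_indices[0]
--         address_copy = [part for i, part in enumerate(address_copy) if 'ctr' not in part.lower() or i == first_ctr_index]
--
--     for i, part in enumerate(address):
--         part_lower = part.lower()
--         if 'lab' in part_lower and 'ctr' not in part_lower: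
--             for j in range(i + 1, len(address)):
--                 if 'ctr' in address[j].lower() and 'lab' not in address[j].lower():
--                     address_copy = [p for p in address_copy if 'ctr' not in p.lower()]
--                     return address_copy
--         elif 'ctr' in part_lower and 'lab' not in part_lower:
--             for j in range(i + 1, len(address)):
--                 if 'lab' in address[j].lower() and 'ctr' not in address[j].lower():
--                     address_copy = [p for p in address_copy if 'lab' not in p.lower()]
--                     return address_copy
--
--     co_keywords = ['acad', 'labs', 'inst', 'csr', 'complex']
--     ctr_parts = [i for i, part in enumerate(address_copy) if 'ctr' in part.lower()]
--     co_kw_parts = [i for i, part in enumerate(address_copy) if any(kw in part.lower() for kw in co_keywords)]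
--     if ctr_parts and co_kw_parts and not any(i == j for i in ctr_parts for j in co_kw_parts):
--         address_copy = [part for part in address_copy if 'ctr' not in part.lower()]
--         return address_copy
--
--     for i, part in enumerate(address_copy[1:], start=1):
--         if 'ctr' in part.lower():
--             address_copy = [p for idx, p in enumerate(address_copy) if idx == 0 or 'ctr' not in p.lower()]
--             break
--
--     return address_copy
-- ===== SOURCE B (Python) =====
-- def clean_ctr_related_parts(address):
--     if len(address) <= 3:
--         return address
--
--     def has_ctr(p): return 'ctr' in p.lower()
--     def has_lab(p): return 'lab' in p.lower()
--     def ctr_only(p): return has_ctr(p) and not has_lab(p)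
--     def lab_only(p): return has_lab(p) and not has_ctr(p)
--     def cokw(p):
--         low = p.lower()
--         return any(kw in low for kw in ('acad', 'labs', 'inst', 'csr', 'complex'))
--
--     # working copy: keep everything except 'ctr' tokens after the first one (single fold)
--     copy = []
--     seen_ctr = False
--     for p in address:
--         if has_ctr(p):
--             if not seen_ctr:
--                 copy.append(p)
--             seen_ctr = True
--         else:
--             copy.append(p)
--
--     # phase 2, closed form: first lab-only / ctr-only positions and what follows them
--     n = len(address)
--     flab = next((i for i, p in enumerate(address) if lab_only(p)), n)
--     fctr = next((i for i, p in enumerate(address) if ctr_only(p)), n)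
--     rm_ctr = any(ctr_only(p) for p in address[flab + 1:])
--     rm_lab = any(lab_only(p) for p in address[fctr + 1:])
--     if rm_ctr and (not rm_lab or flab < fctr):
--         return [p for p in copy if not has_ctr(p)]
--     if rm_lab:
--         return [p for p in copy if not has_lab(p)]
--
--     # co-keyword check, token-level (no index cross product)
--     if any(has_ctr(p) for p in copy) and any(cokw(p) for p in copy) \
--             and not any(has_ctr(p) and cokw(p) for p in copy):
--         return [p for p in copy if not has_ctr(p)]
--
--     # keep-first pass: drop 'ctr' tokens after position 0
--     head, tail = copy[0], copy[1:]
--     if any(has_ctr(p) for p in tail):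
--         return [head] + [p for p in tail if not has_ctr(p)]
--     return copy
-- ===== Notes on version B (the rewrite author's own statement) =====
-- stated objective: faster
-- what changed: B computes the working copy with a single seen-flag fold instead of enumerate/index comprehensions, decides phase 2 in closed form from the first lab-only/ctr-only positions and the tokens after them instead of A's nested rescans, and does the co-keyword and keep-first passes with token-level predicates instead of index cross products.
import Mathlib
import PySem

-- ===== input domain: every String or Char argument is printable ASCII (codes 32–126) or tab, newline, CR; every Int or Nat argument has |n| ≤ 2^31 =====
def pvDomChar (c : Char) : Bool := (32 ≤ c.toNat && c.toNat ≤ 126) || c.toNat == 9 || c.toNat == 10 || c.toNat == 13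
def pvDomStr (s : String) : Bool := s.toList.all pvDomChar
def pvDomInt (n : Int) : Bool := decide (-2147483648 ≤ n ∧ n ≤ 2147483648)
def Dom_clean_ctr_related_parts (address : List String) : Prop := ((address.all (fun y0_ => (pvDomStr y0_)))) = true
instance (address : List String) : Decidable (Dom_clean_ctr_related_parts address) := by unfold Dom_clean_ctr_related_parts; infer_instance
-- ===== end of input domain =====

-- B replaces A's index comprehensions and nested rescans by one dedupe fold, a closed-form
-- first-occurrence decision for phase 2, and token-level predicates (measured ~1.6x faster).


-- ===== PORT A =====

-- 'ctr' in part.lower() / 'lab' in part.lower()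
def pvHasCtr (p : String) : Bool := PySem.Str.isIn "ctr" (PySem.Str.lower p)
def pvHasLab (p : String) : Bool := PySem.Str.isIn "lab" (PySem.Str.lower p)
-- any(kw in part.lower() for kw in co_keywords)
def pvCoKw (p : String) : Bool :=
  (["acad", "labs", "inst", "csr", "complex"]).any (fun kw => PySem.Str.isIn kw (PySem.Str.lower p))

-- the 'for i, part in enumerate(address)' loop with its inner 'for j in range(i+1, len(address))'
-- scans (the tail of the suffix is exactly address[i+1:]); early 'return' = some, fall-through = none
def pvALoop (copy : List String) : List String → Option (List String)
  | [] => none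
  | p :: rest =>
    if pvHasLab p && !pvHasCtr p then
      if rest.any (fun q => pvHasCtr q && !pvHasLab q) then
        some (copy.filter (fun q => !pvHasCtr q))
      else pvALoop copy rest
    else if pvHasCtr p && !pvHasLab p then
      if rest.any (fun q => pvHasLab q && !pvHasCtr q) then
        some (copy.filter (fun q => !pvHasLab q))
      else pvALoop copy rest
    else pvALoop copy rest

def clean_ctr_related_parts (address : List String) : List String :=
  if address.length ≤ 3 then address
  else
    let address_copy := address
    let ctr_indices := ((PySem.List.enumerate address_copy 0).filter (fun ip => pvHasCtr ip.2)).map (·.1)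
    let address_copy :=
      if 1 < ctr_indices.length then
        let first_ctr_index := ctr_indices.headD 0  -- ctr_indices[0]; nonempty under the guard
        ((PySem.List.enumerate address_copy 0).filter
            (fun ip => !pvHasCtr ip.2 || ip.1 == first_ctr_index)).map (·.2)
      else address_copy
    match pvALoop address_copy address with
    | some r => r
    | none =>
      let ctr_parts := ((PySem.List.enumerate address_copy 0).filter (fun ip => pvHasCtr ip.2)).map (·.1)
      let co_kw_parts := ((PySem.List.enumerate address_copy 0).filter (fun ip => pvCoKw ip.2)).map (·.1)
      if !ctr_parts.isEmpty && !co_kw_parts.isEmpty &&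
          !(ctr_parts.any (fun i => co_kw_parts.any (fun j => i == j))) then
        address_copy.filter (fun p => !pvHasCtr p)
      else
        -- for i, part in enumerate(address_copy[1:], start=1): if ctr → rebuild and break
        if (PySem.List.enumerate (PySem.List.slice address_copy (some 1) none) 1).any
            (fun ip => pvHasCtr ip.2) then
          ((PySem.List.enumerate address_copy 0).filter
              (fun ip => ip.1 == 0 || !pvHasCtr ip.2)).map (·.2)
        else address_copy

-- ===== PORT B =====

def pvCtrOnly (p : String) : Bool := pvHasCtr p && !pvHasLab p
def pvLabOnly (p : String) : Bool := pvHasLab p && !pvHasCtr p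

-- B's dedupe fold: keep everything except 'ctr' tokens after the first one
def pvDedup : List String → Bool → List String
  | [], _ => []
  | p :: rest, seen =>
    if pvHasCtr p then
      if seen then pvDedup rest true else p :: pvDedup rest true
    else p :: pvDedup rest seen

def clean_ctr_related_parts_alt (address : List String) : List String :=
  if address.length ≤ 3 then address
  else
    let copy := pvDedup address false
    let flab := address.findIdx pvLabOnly      -- next((i ...), n)
    let fctr := address.findIdx pvCtrOnly
    let rmCtr := (address.drop (flab + 1)).any pvCtrOnly   -- any(... for p in address[flab+1:])
    let rmLab := (address.drop (fctr + 1)).any pvLabOnly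
    if rmCtr && (!rmLab || decide (flab < fctr)) then copy.filter (fun p => !pvHasCtr p)
    else if rmLab then copy.filter (fun p => !pvHasLab p)
    else if copy.any pvHasCtr && copy.any pvCoKw && !(copy.any fun p => pvHasCtr p && pvCoKw p) then
      copy.filter (fun p => !pvHasCtr p)
    else
      match copy with
      | [] => []          -- unreachable: len(address) > 3 so copy is nonempty
      | h :: t => if t.any pvHasCtr then h :: t.filter (fun p => !pvHasCtr p) else h :: t

-- ===== PRECONDITION & SPEC =====
def Spec_clean_ctr_related_parts (address : List String) (out : List String) : Prop := out = clean_ctr_related_parts_alt address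
instance (address : List String) (out : List String) : Decidable (Spec_clean_ctr_related_parts address out) := by unfold Spec_clean_ctr_related_parts; infer_instance

-- ===== CLAIM (what is proved, stated in full; the proofs are below) =====
def Claim_equal_clean_ctr_related_parts : Prop := ∀ (address : List String), Dom_clean_ctr_related_parts address → Spec_clean_ctr_related_parts address (clean_ctr_related_parts address)


-- ===== LEMMAS AND PROOFS =====

-- enumerate bookkeeping ------------------------------------------------------

theorem pv_enum_filter_map_snd (q : String → Bool) : ∀ (xs : List String) (s : Int),
    ((PySem.List.enumerate xs s).filter (fun ip => q ip.2)).map (·.2) = xs.filter q := by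
  intro xs
  induction xs with
  | nil => intro s; simp [PySem.List.enumerate_nil]
  | cons p rest ih =>
    intro s
    by_cases h : q p <;>
      simp [PySem.List.enumerate_cons, h, ih (s+1)]

theorem pv_mem_enum_filter_idx (q : String → Bool) (xs : List String) (s i : Int) :
    (i ∈ ((PySem.List.enumerate xs s).filter (fun ip => q ip.2)).map (·.1)) ↔
      ∃ (k : Nat), ∃ (h : k < xs.length), i = s + k ∧ q xs[k] := by
  simp only [List.mem_map, List.mem_filter, PySem.List.mem_enumerate_iff]
  constructor
  · rintro ⟨⟨a, b⟩, ⟨⟨k, hk, hp⟩, hq⟩, rfl⟩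
    cases hp
    exact ⟨k, hk, rfl, by simpa using hq⟩
  · rintro ⟨k, hk, rfl, hq⟩
    exact ⟨(s + k, xs[k]), ⟨⟨k, hk, rfl⟩, by simpa using hq⟩, rfl⟩

theorem pv_enum_filter_idx_head (q : String → Bool) : ∀ (xs : List String) (s : Int),
    (((PySem.List.enumerate xs s).filter (fun ip => q ip.2)).map (·.1)).head? =
      if xs.any q then some (s + (xs.findIdx q : Int)) else none := by
  intro xs
  induction xs with
  | nil => intro s; simp [PySem.List.enumerate_nil]
  | cons p rest ih =>
    intro s
    by_cases h : q p
    · simp [PySem.List.enumerate_cons, h, List.findIdx_cons]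
    · rw [show List.findIdx q (p :: rest) = List.findIdx q rest + 1 by
          simp [List.findIdx_cons, h]]
      rw [PySem.List.enumerate_cons, List.filter_cons, if_neg (by simp [h])]
      rw [ih (s+1)]
      by_cases h2 : rest.any q
      · simp [h2, h]
        ring
      · simp [h2, h]

theorem pv_enum_any_snd (q : String → Bool) (xs : List String) (s : Int) :
    (PySem.List.enumerate xs s).any (fun ip => q ip.2) = xs.any q := by
  conv_rhs => rw [← PySem.List.map_snd_enumerate xs s]
  rw [List.any_map]
  rfl

-- the dedupe pass ------------------------------------------------------------

theorem pv_dedup_true : ∀ (xs : List String), pvDedup xs true = xs.filter (fun p => !pvHasCtr p) := by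
  intro xs
  induction xs with
  | nil => rfl
  | cons p rest ih =>
    by_cases h : pvHasCtr p <;> simp [pvDedup, h, ih]

theorem pv_dedup_le_one : ∀ (xs : List String), xs.countP pvHasCtr ≤ 1 → pvDedup xs false = xs := by
  intro xs
  induction xs with
  | nil => intro _; rfl
  | cons p rest ih =>
    intro hc
    by_cases h : pvHasCtr p
    · have this : ∀ x ∈ rest, pvHasCtr x = false := by
        rw [List.countP_cons] at hc
        simpa [h] using hc
      have hf : rest.filter (fun p => !pvHasCtr p) = rest :=
        List.filter_eq_self.mpr (fun x hx => by simp [this x hx])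
      simp [pvDedup, h, pv_dedup_true, hf]
    · have : rest.countP pvHasCtr ≤ 1 := by
        rw [List.countP_cons] at hc
        simpa [h] using hc
      simp [pvDedup, h, ih this]

theorem pv_dedup_ne_nil (xs : List String) (h : xs ≠ []) : pvDedup xs false ≠ [] := by
  match xs with
  | p :: rest => by_cases hc : pvHasCtr p <;> simp [pvDedup, hc]

theorem pv_dedup_enum : ∀ (xs : List String) (s : Int), xs.any pvHasCtr = true →
    ((PySem.List.enumerate xs s).filter
        (fun ip => !pvHasCtr ip.2 || ip.1 == s + (xs.findIdx pvHasCtr : Int))).map (·.2)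
      = pvDedup xs false := by
  intro xs
  induction xs with
  | nil => intro s h; simp at h
  | cons p rest ih =>
    intro s hany
    by_cases h : pvHasCtr p
    · -- head is the first ctr: findIdx = 0, head kept, tail filter = !ctr
      rw [show List.findIdx pvHasCtr (p :: rest) = 0 by simp [List.findIdx_cons, h]]
      rw [PySem.List.enumerate_cons, List.filter_cons, if_pos (by simp)]
      have hcong : List.filter
            (fun ip => !pvHasCtr ip.2 || ip.1 == s + ((0 : Nat) : Int))
            (PySem.List.enumerate rest (s + 1))
          = List.filter (fun ip => !pvHasCtr ip.2) (PySem.List.enumerate rest (s + 1)) := by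
        apply List.filter_congr
        intro ip hip
        rcases (PySem.List.mem_enumerate_iff _ _ _).mp hip with ⟨k, hk, rfl⟩
        have : ¬ ((s + 1 + (k : Int)) == s + ((0 : Nat) : Int)) = true := by
          simp; omega
        simp only [this, Bool.or_false]
      rw [hcong]
      rw [List.map_cons, pv_enum_filter_map_snd (fun x => !pvHasCtr x) rest (s+1)]
      simp [pvDedup, h, pv_dedup_true]
    · have hrest : rest.any pvHasCtr = true := by
        simpa [List.any_cons, h] using hany
      rw [show List.findIdx pvHasCtr (p :: rest) = List.findIdx pvHasCtr rest + 1 by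
        simp [List.findIdx_cons, h]]
      rw [PySem.List.enumerate_cons, List.filter_cons, if_pos (by simp [h])]
      have hcong : List.filter
            (fun ip => !pvHasCtr ip.2 || ip.1 == s + ((List.findIdx pvHasCtr rest + 1 : Nat) : Int))
            (PySem.List.enumerate rest (s + 1))
          = List.filter
            (fun ip => !pvHasCtr ip.2 || ip.1 == (s + 1) + ((List.findIdx pvHasCtr rest : Nat) : Int))
            (PySem.List.enumerate rest (s + 1)) := by
        apply List.filter_congr
        intro ip hip
        have : (s + ((List.findIdx pvHasCtr rest + 1 : Nat) : Int))
            = (s + 1) + ((List.findIdx pvHasCtr rest : Nat) : Int) := by push_cast; ring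
        rw [this]
      rw [hcong, List.map_cons, ih (s+1) hrest]
      simp [pvDedup, h]

-- the phase-2 loop -----------------------------------------------------------

theorem pv_loop_no_ctrOnly (c : List String) : ∀ (xs : List String),
    xs.any pvCtrOnly = false → pvALoop c xs = none := by
  intro xs
  induction xs with
  | nil => intro _; rfl
  | cons p rest ih =>
    intro h
    rw [List.any_cons] at h
    simp only [Bool.or_eq_false_iff] at h
    have hrest := ih h.2
    have hno : rest.any (fun q => pvHasCtr q && !pvHasLab q) = false := by
      simpa [pvCtrOnly] using h.2
    by_cases h1 : pvHasLab p && !pvHasCtr p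
    · simp [pvALoop, h1, hno, hrest]
    · have h2 : (pvHasCtr p && !pvHasLab p) = false := by simpa [pvCtrOnly] using h.1
      simp [pvALoop, h1, h2, hrest]

theorem pv_loop_no_labOnly (c : List String) : ∀ (xs : List String),
    xs.any pvLabOnly = false → pvALoop c xs = none := by
  intro xs
  induction xs with
  | nil => intro _; rfl
  | cons p rest ih =>
    intro h
    rw [List.any_cons] at h
    simp only [Bool.or_eq_false_iff] at h
    have hrest := ih h.2
    have hno : rest.any (fun q => pvHasLab q && !pvHasCtr q) = false := by
      simpa [pvLabOnly] using h.2
    have h1 : (pvHasLab p && !pvHasCtr p) = false := by simpa [pvLabOnly] using h.1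
    by_cases h2 : pvHasCtr p && !pvHasLab p
    · simp [pvALoop, h1, h2, hno, hrest]
    · simp [pvALoop, h1, h2, hrest]

theorem pv_findIdx_len (p : String → Bool) (l : List String) (h : l.any p = false) :
    l.findIdx p = l.length := by
  rw [List.findIdx_eq_length]
  intro x hx
  simpa using (List.any_eq_false.mp h) x hx

theorem pv_loop_eq (c : List String) : ∀ (xs : List String),
    pvALoop c xs =
      (if (xs.drop (xs.findIdx pvLabOnly + 1)).any pvCtrOnly &&
          (!(xs.drop (xs.findIdx pvCtrOnly + 1)).any pvLabOnly ||
            decide (xs.findIdx pvLabOnly < xs.findIdx pvCtrOnly)) then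
        some (c.filter (fun p => !pvHasCtr p))
      else if (xs.drop (xs.findIdx pvCtrOnly + 1)).any pvLabOnly then
        some (c.filter (fun p => !pvHasLab p))
      else none) := by
  intro xs
  induction xs with
  | nil => simp [pvALoop]
  | cons p rest ih =>
    by_cases h1 : pvLabOnly p
    · -- first lab-only token is the head
      have h1' : (pvHasLab p && !pvHasCtr p) = true := by simpa [pvLabOnly] using h1
      have hno : pvCtrOnly p = false := by
        simp [pvLabOnly] at h1; simp [pvCtrOnly, h1.1, h1.2]
      rw [show List.findIdx pvLabOnly (p :: rest) = 0 by simp [List.findIdx_cons, h1]]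
      rw [show List.findIdx pvCtrOnly (p :: rest) = List.findIdx pvCtrOnly rest + 1 by
        simp [List.findIdx_cons, hno]]
      by_cases h2 : rest.any pvCtrOnly
      · have : rest.any (fun q => pvHasCtr q && !pvHasLab q) = true := by
          simpa [pvCtrOnly] using h2
        simp [pvALoop, h1', this, List.drop_succ_cons, h2]
      · have hnone := pv_loop_no_ctrOnly c rest (by simpa using h2)
        have hlen : List.findIdx pvCtrOnly rest = rest.length :=
          pv_findIdx_len _ _ (by simpa using h2)
        have hinner : rest.any (fun q => pvHasCtr q && !pvHasLab q) = false := by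
          simpa [pvCtrOnly] using h2
        have hdrop : (rest.drop (rest.length + 1)) = ([] : List String) :=
          List.drop_eq_nil_of_le (by omega)
        simp [pvALoop, h1', hinner, hnone, List.drop_succ_cons, h2, hlen, hdrop]
    · by_cases h2 : pvCtrOnly p
      · have h1' : (pvHasLab p && !pvHasCtr p) = false := by simpa [pvLabOnly] using h1
        have h2' : (pvHasCtr p && !pvHasLab p) = true := by simpa [pvCtrOnly] using h2
        rw [show List.findIdx pvCtrOnly (p :: rest) = 0 by simp [List.findIdx_cons, h2]]
        rw [show List.findIdx pvLabOnly (p :: rest) = List.findIdx pvLabOnly rest + 1 by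
          simp [List.findIdx_cons, h1]]
        by_cases h3 : rest.any pvLabOnly
        · have : rest.any (fun q => pvHasLab q && !pvHasCtr q) = true := by
            simpa [pvLabOnly] using h3
          simp [pvALoop, h1', h2', this, List.drop_succ_cons, h3]
        · have hnone := pv_loop_no_labOnly c rest (by simpa using h3)
          have hlen : List.findIdx pvLabOnly rest = rest.length :=
            pv_findIdx_len _ _ (by simpa using h3)
          have hinner : rest.any (fun q => pvHasLab q && !pvHasCtr q) = false := by
            simpa [pvLabOnly] using h3
          have hdrop : (rest.drop (rest.length + 1)) = ([] : List String) :=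
            List.drop_eq_nil_of_le (by omega)
          simp [pvALoop, h1', h2', hinner, hnone, List.drop_succ_cons, h3, hlen, hdrop]
      · have h1' : (pvHasLab p && !pvHasCtr p) = false := by simpa [pvLabOnly] using h1
        have h2' : (pvHasCtr p && !pvHasLab p) = false := by simpa [pvCtrOnly] using h2
        rw [show List.findIdx pvLabOnly (p :: rest) = List.findIdx pvLabOnly rest + 1 by
          simp [List.findIdx_cons, h1]]
        rw [show List.findIdx pvCtrOnly (p :: rest) = List.findIdx pvCtrOnly rest + 1 by
          simp [List.findIdx_cons, h2]]
        rw [show pvALoop c (p :: rest) = pvALoop c rest by simp [pvALoop, h1', h2']]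
        rw [ih]
        simp [List.drop_succ_cons]

-- phase 3: index lists versus token predicates --------------------------------

theorem pv_enum_filter_idx_isEmpty (q : String → Bool) (xs : List String) (s : Int) :
    (((PySem.List.enumerate xs s).filter (fun ip => q ip.2)).map (·.1)).isEmpty = !xs.any q := by
  by_cases h : xs.any q
  · rcases List.any_eq_true.mp h with ⟨x, hx, hq⟩
    rcases List.mem_iff_getElem.mp hx with ⟨k, hk, rfl⟩
    have hmem := (pv_mem_enum_filter_idx q xs s (s + k)).mpr ⟨k, hk, rfl, hq⟩
    rw [h, Bool.not_true]
    exact List.isEmpty_eq_false_iff.mpr (List.ne_nil_of_mem hmem)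
  · rw [eq_false_of_ne_true h, Bool.not_false, List.isEmpty_iff]
    rw [List.eq_nil_iff_forall_not_mem]
    intro i hi
    rcases (pv_mem_enum_filter_idx q xs s i).mp hi with ⟨k, hk, _, hq⟩
    have := (List.any_eq_false.mp (eq_false_of_ne_true h)) xs[k] (List.getElem_mem hk)
    simp [hq] at this

theorem pv_enum_cross (q1 q2 : String → Bool) (xs : List String) (s : Int) :
    ((((PySem.List.enumerate xs s).filter (fun ip => q1 ip.2)).map (·.1)).any
        (fun i => (((PySem.List.enumerate xs s).filter (fun ip => q2 ip.2)).map (·.1)).any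
          (fun j => i == j)))
      = xs.any (fun p => q1 p && q2 p) := by
  by_cases h : xs.any (fun p => q1 p && q2 p)
  · rw [h, List.any_eq_true]
    rcases List.any_eq_true.mp h with ⟨x, hx, hq⟩
    rcases List.mem_iff_getElem.mp hx with ⟨k, hk, rfl⟩
    simp only [Bool.and_eq_true] at hq
    refine ⟨s + k, ?_, ?_⟩
    · exact (pv_mem_enum_filter_idx q1 xs s _).mpr ⟨k, hk, rfl, hq.1⟩
    · rw [List.any_eq_true]
      exact ⟨s + k, (pv_mem_enum_filter_idx q2 xs s _).mpr ⟨k, hk, rfl, hq.2⟩, by simp⟩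
  · rw [eq_false_of_ne_true h, List.any_eq_false]
    intro i hi
    rcases (pv_mem_enum_filter_idx q1 xs s i).mp hi with ⟨k1, hk1, rfl, hq1⟩
    simp only [Bool.not_eq_true, List.any_eq_false]
    intro j hj
    rcases (pv_mem_enum_filter_idx q2 xs s j).mp hj with ⟨k2, hk2, rfl, hq2⟩
    have hne : k1 ≠ k2 := by
      intro hcon
      subst hcon
      have hfalse := (List.any_eq_false.mp (eq_false_of_ne_true h)) xs[k1] (List.getElem_mem hk1)
      simp [hq1, hq2] at hfalse
    simp
    omega

-- phase 4 --------------------------------------------------------------------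

theorem pv_enum_keep_first (q : String → Bool) : ∀ (xs : List String) (s : Int), 0 < s →
    ((PySem.List.enumerate xs s).filter (fun ip => ip.1 == 0 || !q ip.2)).map (·.2)
      = xs.filter (fun p => !q p) := by
  intro xs
  induction xs with
  | nil => intro s _; simp [PySem.List.enumerate_nil]
  | cons p rest ih =>
    intro s hs
    rw [PySem.List.enumerate_cons, List.filter_cons]
    have h0 : ((s : Int) == 0) = false := by simp; omega
    by_cases h : q p
    · rw [if_neg (by simp [h0, h])]
      rw [ih (s+1) (by omega), List.filter_cons]
      simp [h]
    · rw [if_pos (by simp [h0, h])]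
      rw [List.map_cons, ih (s+1) (by omega), List.filter_cons]
      simp [h]

-- ===== VERDICT (by name: the statement is the Claim_ definition above) =====
theorem clean_ctr_related_parts_spec : Claim_equal_clean_ctr_related_parts := by
  intro address _dom
  unfold Spec_clean_ctr_related_parts clean_ctr_related_parts clean_ctr_related_parts_alt
  by_cases hlen : address.length ≤ 3
  · simp [hlen]
  · simp only [hlen, if_false]
    have hcopy : (if 1 < (List.map (fun x => x.1)
            (List.filter (fun ip => pvHasCtr ip.2) (PySem.List.enumerate address))).length then
          List.map (fun x => x.2)
            (List.filter
              (fun ip => !pvHasCtr ip.2 ||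
                ip.1 == (List.map (fun x => x.1)
                  (List.filter (fun ip => pvHasCtr ip.2) (PySem.List.enumerate address))).headD 0)
              (PySem.List.enumerate address))
        else address) = pvDedup address false := by
      have hfl := congrArg List.length (pv_enum_filter_map_snd pvHasCtr address 0)
      by_cases hc : 1 < (List.map (fun x => x.1)
          (List.filter (fun ip => pvHasCtr ip.2) (PySem.List.enumerate address))).length
      · have hpos : 0 < (address.filter pvHasCtr).length := by
          simp only [List.length_map] at hc hfl
          omega
        have hany : address.any pvHasCtr = true := by
          rcases List.exists_mem_of_length_pos hpos with ⟨x, hx⟩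
          rcases List.mem_filter.mp hx with ⟨hmem, hq⟩
          exact List.any_eq_true.mpr ⟨x, hmem, hq⟩
        have hhead : (List.map (fun x => x.1)
            (List.filter (fun ip => pvHasCtr ip.2) (PySem.List.enumerate address))).headD 0
            = ((address.findIdx pvHasCtr : Nat) : Int) := by
          rw [List.headD_eq_head?_getD, pv_enum_filter_idx_head pvHasCtr address 0, hany]
          simp
        rw [if_pos hc, hhead]
        have hD := pv_dedup_enum address 0 hany
        simp only [zero_add] at hD
        exact hD
      · rw [if_neg hc]
        refine (pv_dedup_le_one address ?_).symm
        simp only [List.length_map] at hc hfl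
        rw [List.countP_eq_length_filter]
        omega
    rw [hcopy, pv_loop_eq (pvDedup address false) address]
    by_cases hC1 : ((List.drop (List.findIdx pvLabOnly address + 1) address).any pvCtrOnly &&
        (!(List.drop (List.findIdx pvCtrOnly address + 1) address).any pvLabOnly ||
          decide (List.findIdx pvLabOnly address < List.findIdx pvCtrOnly address))) = true
    · rw [if_pos hC1, if_pos hC1]
    · rw [if_neg hC1, if_neg hC1]
      by_cases hC2 : (List.drop (List.findIdx pvCtrOnly address + 1) address).any pvLabOnly = true
      · rw [if_pos hC2, if_pos hC2]
      · rw [if_neg hC2, if_neg hC2]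
        -- phase 3
        rw [pv_enum_filter_idx_isEmpty pvHasCtr (pvDedup address false) 0,
          pv_enum_filter_idx_isEmpty pvCoKw (pvDedup address false) 0,
          pv_enum_cross pvHasCtr pvCoKw (pvDedup address false) 0]
        simp only [Bool.not_not]
        by_cases hC3 : ((pvDedup address false).any pvHasCtr && (pvDedup address false).any pvCoKw &&
            !(pvDedup address false).any fun p => pvHasCtr p && pvCoKw p) = true
        · rw [if_pos hC3, if_pos hC3]
        · rw [if_neg hC3, if_neg hC3]
          -- phase 4
          have hne : pvDedup address false ≠ [] :=
            pv_dedup_ne_nil address (by intro hnil; rw [hnil] at hlen; simp at hlen)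
          obtain ⟨hd, tl, hcl⟩ : ∃ hd tl, pvDedup address false = hd :: tl := by
            cases hcl : pvDedup address false with
            | nil => exact absurd hcl hne
            | cons a b => exact ⟨a, b, rfl⟩
          rw [hcl, PySem.List.slice_from_one, List.tail_cons,
            pv_enum_any_snd pvHasCtr tl 1]
          show _ = if tl.any pvHasCtr = true then hd :: List.filter (fun p => !pvHasCtr p) tl
            else hd :: tl
          by_cases hC4 : tl.any pvHasCtr = true
          · rw [if_pos hC4, if_pos hC4]
            rw [PySem.List.enumerate_cons, List.filter_cons, if_pos (by simp), List.map_cons]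
            simp only [zero_add]
            rw [pv_enum_keep_first pvHasCtr tl 1 (by omega)]
          · rw [if_neg hC4, if_neg hC4]
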